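-- pv_equiv track=rewrite | github.com/HussainAther/DFlow-Peptide-Membrane | dflow_reversible.py | _subcomponents_after_cut
-- ===== SOURCE A (Python) =====
-- def _subcomponents_after_cut(nodes_set, adj, cut):
--     """Return two node-sets after removing edge 'cut' = (u,v) from the induced graph."""
--     u, v = cut
--
--     def bfs(start, block):
--         seen = set()
--         stack = [start]
--         bu, bv = block
--         while stack:
--             x = stack.pop()
--             if x in seen:
--                 continue
--             seen.add(x)
--             for w in adj.get(x, ()):
--                 if (x == bu and w == bv) or (x == bv and w == bu):
--                     continue
--                 if w not in seen:
--                     stack.append(w)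
--         return seen
--
--     u_side = bfs(u, (u, v))
--     v_side = nodes_set - u_side
--     return u_side, v_side
-- ===== SOURCE B (Python) =====
-- def _subcomponents_after_cut(nodes_set, adj, cut):
--     """Return two node-sets after removing edge 'cut' = (u,v) from the induced graph."""
--     u, v = cut
--
--     def children(x, seen):
--         # neighbours of x still worth visiting: cut edge skipped (both directions),
--         # already-seen nodes dropped
--         return [w for w in adj.get(x, ())
--                 if not ((x == u and w == v) or (x == v and w == u)) and w not in seen]
--
--     seen = {u}
--     frames = []
--     p = children(u, seen)
--     if p:
--         frames.append(p)
--     while frames: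
--         top = frames[-1]
--         w = top.pop()
--         if not top:
--             frames.pop()
--         if w not in seen:
--             seen.add(w)
--             p = children(w, seen)
--             if p:
--                 frames.append(p)
--     return seen, nodes_set - seen
-- ===== Notes on version B (the rewrite author's own statement) =====
-- stated objective: alternative
-- what changed: A runs a DFS over a stack of node entries that may hold duplicates and re-checks 'seen' at pop; B runs an iterator-style DFS over a stack of pre-filtered sibling frames, marking each node when it descends into it, so the stack holds each pending neighbour list once instead of flattened duplicate node entries.
import Mathlib
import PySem

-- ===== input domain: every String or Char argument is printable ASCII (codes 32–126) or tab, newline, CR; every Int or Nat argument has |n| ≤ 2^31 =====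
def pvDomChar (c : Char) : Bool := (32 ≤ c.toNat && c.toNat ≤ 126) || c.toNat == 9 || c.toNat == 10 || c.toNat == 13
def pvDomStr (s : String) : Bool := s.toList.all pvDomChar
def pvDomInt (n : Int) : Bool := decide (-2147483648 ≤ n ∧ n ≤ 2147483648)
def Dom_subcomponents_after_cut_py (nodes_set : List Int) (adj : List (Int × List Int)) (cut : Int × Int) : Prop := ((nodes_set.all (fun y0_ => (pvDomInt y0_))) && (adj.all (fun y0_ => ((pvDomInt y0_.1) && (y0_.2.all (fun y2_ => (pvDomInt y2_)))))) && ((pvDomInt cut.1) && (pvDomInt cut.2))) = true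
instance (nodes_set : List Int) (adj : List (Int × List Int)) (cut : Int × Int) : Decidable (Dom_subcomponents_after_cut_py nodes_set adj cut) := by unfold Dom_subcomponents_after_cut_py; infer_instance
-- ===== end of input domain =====

-- B replaces A's duplicate-carrying node stack by a stack of pre-filtered sibling frames
-- (iterator-style DFS, marking on descent): an alternative decomposition of the same cost.

-- ===== PORT A =====
-- A's bfs while-loop.  The Python stack pushes/pops at the list's END; it is represented
-- here TOP-FIRST, so 'stack.pop()' takes the head and 'stack.append(w)' is 'w :: st'.
-- fuel: one unit per while-iteration; pops ≤ 1 + total pushes ≤ 1 + Σ |adj[k]|.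
def pvBfsA (adj : List (Int × List Int)) (u v : Int) : Nat → PySem.Set Int → List Int → PySem.Set Int
  | 0, seen, _ => seen
  | _ + 1, seen, [] => seen
  | fuel + 1, seen, x :: rest =>
    if PySem.Set.contains seen x then
      pvBfsA adj u v fuel seen rest
    else
      let seen' := PySem.Set.add seen x
      let stack' := (PySem.Dict.getD (PySem.Dict.mk adj) x []).foldl
        (fun st w =>
          if (x == u && w == v) || (x == v && w == u) then st
          else if PySem.Set.contains seen' w then st else w :: st) rest
      pvBfsA adj u v fuel seen' stack'

def subcomponents_after_cut_py (nodes_set : List Int) (adj : List (Int × List Int)) (cut : Int × Int) : List Int × List Int :=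
  let u := cut.1
  let v := cut.2
  let u_side := pvBfsA adj u v ((adj.map (fun kv => kv.2.length)).sum + 1) PySem.Set.empty [u]
  (u_side, PySem.Set.diff nodes_set u_side)

-- ===== PORT B =====
-- B's children(x, seen): a list comprehension over adj.get(x, ()).
def pvChildren (adj : List (Int × List Int)) (u v x : Int) (seen : PySem.Set Int) : List Int :=
  (PySem.Dict.getD (PySem.Dict.mk adj) x []).filter
    (fun w => !((x == u && w == v) || (x == v && w == u)) && !PySem.Set.contains seen w)

-- B's while-loop over the frame stack (head = top frame); each frame is stored
-- REVERSED, so Python's 'top.pop()' (from the frame's end) is taking the head.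
-- fuel: one unit per while-iteration; iterations = frame elements consumed ≤ Σ |adj[k]|.
def pvDfsB (adj : List (Int × List Int)) (u v : Int) : Nat → PySem.Set Int → List (List Int) → PySem.Set Int
  | 0, seen, _ => seen
  | _ + 1, seen, [] => seen
  | _ + 1, seen, [] :: _ => seen   -- unreachable: every frame is nonempty by construction
  | fuel + 1, seen, (w :: ws) :: rest =>
    let frames' := if ws.isEmpty then rest else ws :: rest
    if PySem.Set.contains seen w then pvDfsB adj u v fuel seen frames'
    else
      let seen' := PySem.Set.add seen w
      let p := (pvChildren adj u v w seen').reverse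
      pvDfsB adj u v fuel seen' (if p.isEmpty then frames' else p :: frames')

def subcomponents_after_cut_py_alt (nodes_set : List Int) (adj : List (Int × List Int)) (cut : Int × Int) : List Int × List Int :=
  let u := cut.1
  let v := cut.2
  let seen0 := PySem.Set.add PySem.Set.empty u
  let p := (pvChildren adj u v u seen0).reverse
  let frames0 : List (List Int) := if p.isEmpty then [] else [p]
  let seen := pvDfsB adj u v ((adj.map (fun kv => kv.2.length)).sum) seen0 frames0
  (seen, PySem.Set.diff nodes_set seen)

-- ===== PRECONDITION & SPEC =====
def Spec_subcomponents_after_cut_py (nodes_set : List Int) (adj : List (Int × List Int)) (cut : Int × Int) (out : List Int × List Int) : Prop := out = subcomponents_after_cut_py_alt nodes_set adj cut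
instance (nodes_set : List Int) (adj : List (Int × List Int)) (cut : Int × Int) (out : List Int × List Int) : Decidable (Spec_subcomponents_after_cut_py nodes_set adj cut out) := by unfold Spec_subcomponents_after_cut_py; infer_instance

-- ===== CLAIM (what is proved, stated in full; the proofs are below) =====
def Claim_equal_subcomponents_after_cut_py : Prop := ∀ (nodes_set : List Int) (adj : List (Int × List Int)) (cut : Int × Int), Dom_subcomponents_after_cut_py nodes_set adj cut → Spec_subcomponents_after_cut_py nodes_set adj cut (subcomponents_after_cut_py nodes_set adj cut)

-- ===== LEMMAS AND PROOFS =====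

-- A's push loop builds the reversed filtered neighbour list on top of the old stack.
theorem pvFold_push (u v x : Int) (seen : PySem.Set Int) :
    ∀ (l rest : List Int),
      l.foldl (fun st w =>
          if (x == u && w == v) || (x == v && w == u) then st
          else if PySem.Set.contains seen w then st else w :: st) rest
        = (l.filter (fun w =>
            !((x == u && w == v) || (x == v && w == u)) && !PySem.Set.contains seen w)).reverse ++ rest
  | [], rest => rfl
  | w :: l, rest => by
    simp only [List.foldl_cons, List.filter_cons]
    cases hc : ((x == u && w == v) || (x == v && w == u)) with
    | true => rw [if_pos rfl, pvFold_push u v x seen l rest]; simp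
    | false =>
      cases hs : PySem.Set.contains seen w with
      | true => rw [if_neg Bool.false_ne_true, if_pos rfl, pvFold_push u v x seen l rest]; simp
      | false => rw [if_neg Bool.false_ne_true, if_neg Bool.false_ne_true,
                     pvFold_push u v x seen l (w :: rest)]; simp

-- Simulation: B's frame stack flattens to A's node stack, step for step.
theorem pvBA (adj : List (Int × List Int)) (u v : Int) :
    ∀ (fuel : Nat) (seen : PySem.Set Int) (frames : List (List Int)),
      (∀ f ∈ frames, f ≠ []) →
      pvDfsB adj u v fuel seen frames = pvBfsA adj u v fuel seen frames.flatten
  | 0, _, _, _ => rfl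
  | _ + 1, _, [], _ => rfl
  | _ + 1, _, [] :: _, h => absurd rfl (h [] (by simp))
  | fuel + 1, seen, (w :: ws) :: rest, h => by
    have hrest : ∀ f ∈ rest, f ≠ [] := fun f hf => h f (by simp [hf])
    have hframes' : ∀ f ∈ (if ws.isEmpty then rest else ws :: rest), f ≠ [] := by
      intro f hf
      split at hf
      · exact hrest f hf
      · rcases List.mem_cons.mp hf with rfl | hf'
        · rename_i hw; exact fun h0 => hw (by rw [h0]; rfl)
        · exact hrest f hf'
    have hflat' : (if ws.isEmpty then rest else ws :: rest).flatten = ws ++ rest.flatten := by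
      split
      · rename_i hw; rw [List.isEmpty_iff.mp hw]; simp
      · simp
    show pvDfsB adj u v (fuel + 1) seen ((w :: ws) :: rest)
        = pvBfsA adj u v (fuel + 1) seen (w :: (ws ++ rest.flatten))
    rw [pvDfsB, pvBfsA]
    simp only []
    cases hs : PySem.Set.contains seen w with
    | true =>
      rw [if_pos rfl, if_pos rfl, pvBA adj u v fuel seen _ hframes', hflat']
    | false =>
      rw [if_neg Bool.false_ne_true, if_neg Bool.false_ne_true]
      rw [pvFold_push]
      have hpush : ∀ f ∈ (if ((pvChildren adj u v w (PySem.Set.add seen w)).reverse).isEmpty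
            then (if ws.isEmpty then rest else ws :: rest)
            else (pvChildren adj u v w (PySem.Set.add seen w)).reverse :: (if ws.isEmpty then rest else ws :: rest)),
          f ≠ [] := by
        intro f hf
        split at hf
        · exact hframes' f hf
        · rcases List.mem_cons.mp hf with rfl | hf'
          · rename_i hpe; exact fun h0 => hpe (by rw [h0]; rfl)
          · exact hframes' f hf'
      rw [pvBA adj u v fuel _ _ hpush]
      have hflatp : (if ((pvChildren adj u v w (PySem.Set.add seen w)).reverse).isEmpty
            then (if ws.isEmpty then rest else ws :: rest)
            else (pvChildren adj u v w (PySem.Set.add seen w)).reverse :: (if ws.isEmpty then rest else ws :: rest)).flatten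
          = (pvChildren adj u v w (PySem.Set.add seen w)).reverse ++ (ws ++ rest.flatten) := by
        split
        · rename_i hpe
          rw [List.isEmpty_iff.mp hpe, hflat']
          simp
        · rw [List.flatten_cons, hflat']
      rw [hflatp]
      simp [pvChildren]

-- ===== VERDICT (by name: the statement is the Claim_ definition above) =====
theorem subcomponents_after_cut_py_spec : Claim_equal_subcomponents_after_cut_py := by
  intro nodes_set adj cut _
  unfold Spec_subcomponents_after_cut_py subcomponents_after_cut_py subcomponents_after_cut_py_alt
  set u := cut.1
  set v := cut.2
  set S := (adj.map (fun kv => kv.2.length)).sum with hS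
  simp only []
  have hfirst :
      pvBfsA adj u v (S + 1) PySem.Set.empty [u]
        = pvDfsB adj u v S (PySem.Set.add PySem.Set.empty u)
            (if ((pvChildren adj u v u (PySem.Set.add PySem.Set.empty u)).reverse).isEmpty then []
             else [(pvChildren adj u v u (PySem.Set.add PySem.Set.empty u)).reverse]) := by
    rw [pvBfsA]
    simp only []
    have hc : PySem.Set.contains PySem.Set.empty u = false := rfl
    rw [hc, if_neg Bool.false_ne_true]
    rw [pvFold_push]
    have hne : ∀ f ∈ (if ((pvChildren adj u v u (PySem.Set.add PySem.Set.empty u)).reverse).isEmpty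
          then ([] : List (List Int))
          else [(pvChildren adj u v u (PySem.Set.add PySem.Set.empty u)).reverse]), f ≠ [] := by
      intro f hf
      split at hf
      · simp at hf
      · rcases List.mem_singleton.mp hf with rfl
        rename_i hpe; exact fun h0 => hpe (by rw [h0]; rfl)
    rw [pvBA adj u v S _ _ hne]
    have hfl : (if ((pvChildren adj u v u (PySem.Set.add PySem.Set.empty u)).reverse).isEmpty
          then ([] : List (List Int))
          else [(pvChildren adj u v u (PySem.Set.add PySem.Set.empty u)).reverse]).flatten
        = (pvChildren adj u v u (PySem.Set.add PySem.Set.empty u)).reverse := by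
      split
      · rename_i hpe; rw [List.isEmpty_iff.mp hpe]; simp
      · simp
    rw [hfl]
    simp [pvChildren]
  rw [hfirst]
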